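-- pv_equiv track=rewrite | github.com/edgetrier/ForestMonkey | ForestMonkey/Model.py | convert2List_old
-- ===== SOURCE A (Python) =====
-- def convert2List_old(label, feature, test):
--     data = []
--     id_list = []
--     result = {"detection": [], "miss-detection": [], "type": [], "miss-type": [], "miss-type-strict": []}
--
--     for i in label.keys():
--         id_list.append(i)
--         e = []
--         for j in feature:
--             e.append(label[i][j])
--         data.append(e)
--         if "detection" in test.keys():
--             result["detection"].append(int(test["detection"][i]))
--             if int(test["detection"][i]) == 1:
--                 result["miss-detection"].append(0)
--             else:
--                 result["miss-detection"].append(1)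
--         if "type" in test.keys():
--             result["type"].append(int(test["type"][i]))
--             if int(test["type"][i]) == 1:
--                 result["miss-type"].append(0)
--                 result["miss-type-strict"].append(0)
--             else:
--                 result["miss-type"].append(1)
--                 if int(test["detection"][i]) == 0:
--                     result["miss-type-strict"].append(0)
--                 else:
--                     result["miss-type-strict"].append(1)
--
--         for j in test.keys():
--             if j not in ["detection", "type"]:
--                 if j not in result.keys():
--                     result[j] = []
--                 result[j].append(int(test[j][i]))
--
--     return id_list, feature, data, result
-- ===== SOURCE B (Python) =====
-- def _record(i, test):
--     """All result-column values for one id, as one record."""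
--     rec = {}
--     if "detection" in test:
--         d = int(test["detection"][i])
--         rec["detection"] = d
--         rec["miss-detection"] = 0 if d == 1 else 1
--     if "type" in test:
--         t = int(test["type"][i])
--         rec["type"] = t
--         rec["miss-type"] = 0 if t == 1 else 1
--         rec["miss-type-strict"] = 0 if t == 1 else (0 if int(test["detection"][i]) == 0 else 1)
--     for k in test:
--         if k not in ("detection", "type"):
--             rec[k] = int(test[k][i])
--     return rec
--
-- def convert2List_old(label, feature, test):
--     # Row-record design: build one record per id, then pivot the records
--     # into the columns of the result table.
--     id_list = list(label)
--     data = [[label[i][j] for j in feature] for i in label]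
--     records = [_record(i, test) for i in label]
--     result = {"detection": [], "miss-detection": [], "type": [], "miss-type": [], "miss-type-strict": []}
--     for rec in records:
--         for k, v in rec.items():
--             result.setdefault(k, []).append(v)
--     return id_list, feature, data, result
-- ===== Notes on version B (the rewrite author's own statement) =====
-- stated objective: alternative
-- what changed: B replaces A's single loop that conditionally appends to five fixed column lists and scans test inside it with a row-record design: a pure helper builds one record dict per id, and a generic pivot then transposes the record list into the result columns; Pre_ excludes inputs where A raises KeyError, duplicate outer keys (impossible for Python dicts), and tests that pair a derived column name with its source column while rows exist, where the value kept under that one name is an accidental tie.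
import Mathlib
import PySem

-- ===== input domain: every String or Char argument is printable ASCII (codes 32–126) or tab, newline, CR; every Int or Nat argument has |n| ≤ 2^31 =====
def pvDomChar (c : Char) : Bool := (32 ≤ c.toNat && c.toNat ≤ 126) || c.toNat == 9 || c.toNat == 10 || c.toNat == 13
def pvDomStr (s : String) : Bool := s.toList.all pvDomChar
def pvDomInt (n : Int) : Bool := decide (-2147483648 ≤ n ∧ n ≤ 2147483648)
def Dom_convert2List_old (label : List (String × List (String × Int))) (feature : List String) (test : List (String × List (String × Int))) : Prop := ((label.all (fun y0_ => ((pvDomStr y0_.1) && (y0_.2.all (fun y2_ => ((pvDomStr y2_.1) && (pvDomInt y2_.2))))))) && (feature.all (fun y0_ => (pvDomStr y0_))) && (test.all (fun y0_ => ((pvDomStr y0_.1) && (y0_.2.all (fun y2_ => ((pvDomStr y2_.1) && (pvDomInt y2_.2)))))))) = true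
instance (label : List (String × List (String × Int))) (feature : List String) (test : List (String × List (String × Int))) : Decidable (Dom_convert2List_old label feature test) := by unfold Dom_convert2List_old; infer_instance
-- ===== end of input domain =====

-- B rebuilds the same (ids, feature, data, result) by a row-record design — one record dict per
-- id, then a generic pivot of the record list into columns — instead of A's single loop that
-- conditionally appends to five fixed column lists; objective: alternative decomposition, same cost.

-- ===== PORT A =====
-- A-side helper: the body of A's `for i in label.keys():` loop, acting on the state
-- (id_list, data, result); `result` is the Python dict, ported as PySem.Dict.
def convA_step (feature : List String) (test : List (String × List (String × Int)))
    (st : List String × List (List Int) × PySem.Dict String (List Int))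
    (p : String × List (String × Int)) :
    List String × List (List Int) × PySem.Dict String (List Int) :=
  let idList := st.1 ++ [p.1]
  let e := feature.foldl (fun e j => e ++ [(p.2.lookup j).getD 0]) ([] : List Int)
  let data := st.2.1 ++ [e]
  let r := st.2.2
  let r :=
    if "detection" ∈ test.map Prod.fst then
      let dv := (((test.lookup "detection").getD []).lookup p.1).getD 0
      let r := r.modify "detection" [] (· ++ [dv])
      if dv = 1 then r.modify "miss-detection" [] (· ++ [0])
      else r.modify "miss-detection" [] (· ++ [1])
    else r
  let r :=
    if "type" ∈ test.map Prod.fst then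
      let tv := (((test.lookup "type").getD []).lookup p.1).getD 0
      let r := r.modify "type" [] (· ++ [tv])
      if tv = 1 then
        (r.modify "miss-type" [] (· ++ [0])).modify "miss-type-strict" [] (· ++ [0])
      else
        let r := r.modify "miss-type" [] (· ++ [1])
        let dv := (((test.lookup "detection").getD []).lookup p.1).getD 0
        if dv = 0 then r.modify "miss-type-strict" [] (· ++ [0])
        else r.modify "miss-type-strict" [] (· ++ [1])
    else r
  let r :=
    test.foldl (fun r q =>
      if q.1 ∉ (["detection", "type"] : List String) then
        let r := if q.1 ∉ r.keys then r.insert q.1 [] else r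
        r.modify q.1 [] (· ++ [(q.2.lookup p.1).getD 0])
      else r) r
  (idList, data, r)

def convert2List_old (label : List (String × List (String × Int))) (feature : List String) (test : List (String × List (String × Int))) : List String × List String × List (List Int) × (List (String × List Int)) :=
  let result0 : PySem.Dict String (List Int) :=
    PySem.Dict.ofList [("detection", []), ("miss-detection", []), ("type", []), ("miss-type", []), ("miss-type-strict", [])]
  let fin := label.foldl (convA_step feature test) (([] : List String), ([] : List (List Int)), result0)
  (fin.1, feature, fin.2.1, fin.2.2.items)

-- ===== PORT B =====
-- B-side helper: `_record(i, test)` — all result-column values for one id, as one record.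
def recB (i : String) (test : List (String × List (String × Int))) : PySem.Dict String Int :=
  let rec0 : PySem.Dict String Int := PySem.Dict.mk []
  let rec1 :=
    if "detection" ∈ test.map Prod.fst then
      let d := (((test.lookup "detection").getD []).lookup i).getD 0
      (rec0.insert "detection" d).insert "miss-detection" (if d = 1 then 0 else 1)
    else rec0
  let rec2 :=
    if "type" ∈ test.map Prod.fst then
      let t := (((test.lookup "type").getD []).lookup i).getD 0
      ((rec1.insert "type" t).insert "miss-type" (if t = 1 then 0 else 1)).insert "miss-type-strict"
        (if t = 1 then (0 : Int)
         else if (((test.lookup "detection").getD []).lookup i).getD 0 = 0 then 0 else 1)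
    else rec1
  test.foldl (fun rec q =>
    if q.1 ∉ (["detection", "type"] : List String) then rec.insert q.1 ((q.2.lookup i).getD 0)
    else rec) rec2

def convert2List_old_alt (label : List (String × List (String × Int))) (feature : List String) (test : List (String × List (String × Int))) : List String × List String × List (List Int) × (List (String × List Int)) :=
  let idList := label.map Prod.fst
  let data := label.map (fun p => feature.map (fun j => (p.2.lookup j).getD 0))
  let records := label.map (fun p => recB p.1 test)
  let result0 : PySem.Dict String (List Int) :=
    PySem.Dict.ofList [("detection", []), ("miss-detection", []), ("type", []), ("miss-type", []), ("miss-type-strict", [])]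
  let result := records.foldl (fun r rec =>
    rec.items.foldl (fun r kv => (r.setdefault kv.1 []).modify kv.1 [] (· ++ [kv.2])) r) result0
  (idList, feature, data, result.items)

-- ===== PRECONDITION & SPEC =====
-- Pre_ excludes (a) inputs where Python A raises KeyError (a feature missing from a label row,
-- or a label id missing from a used test column, including test["detection"] read by the
-- miss-type-strict branch); (b) association lists whose outer key lists have duplicates, which
-- do not arise from Python dicts; and (c) tests that, with rows present, feed a derived column
-- and also contain a test column of the same derived name ("miss-detection" with "detection",
-- "miss-type"/"miss-type-strict" with "type"): there the two values under that one name are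
-- both defensible and no one would specify either.
def Pre_convert2List_old (label : List (String × List (String × Int))) (feature : List String) (test : List (String × List (String × Int))) : Prop :=
  (label.map Prod.fst).Nodup ∧ (test.map Prod.fst).Nodup ∧
  (∀ p ∈ label,
     (∀ j ∈ feature, j ∈ p.2.map Prod.fst) ∧
     ("detection" ∈ test.map Prod.fst → p.1 ∈ ((test.lookup "detection").getD []).map Prod.fst) ∧
     ("type" ∈ test.map Prod.fst →
        p.1 ∈ ((test.lookup "type").getD []).map Prod.fst ∧
        ((((test.lookup "type").getD []).lookup p.1).getD 0 ≠ 1 →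
          "detection" ∈ test.map Prod.fst ∧ p.1 ∈ ((test.lookup "detection").getD []).map Prod.fst)) ∧
     (∀ q ∈ test, q.1 ∉ (["detection", "type"] : List String) → p.1 ∈ q.2.map Prod.fst)) ∧
  (label ≠ [] →
     ¬("detection" ∈ test.map Prod.fst ∧ "miss-detection" ∈ test.map Prod.fst) ∧
     ¬("type" ∈ test.map Prod.fst ∧ ("miss-type" ∈ test.map Prod.fst ∨ "miss-type-strict" ∈ test.map Prod.fst)))
instance (label : List (String × List (String × Int))) (feature : List String) (test : List (String × List (String × Int))) : Decidable (Pre_convert2List_old label feature test) := by unfold Pre_convert2List_old; exact instDecidableAnd (dq := instDecidableAnd (dq := instDecidableAnd))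

def pvWitness_convert2List_old : (List (String × List (String × Int))) × List String × (List (String × List (String × Int))) :=
  ([("a", [("f", 1)])], ["f"], [("detection", [("a", 1)]), ("type", [("a", 0)]), ("x", [("a", 3)])])

def Spec_convert2List_old (label : List (String × List (String × Int))) (feature : List String) (test : List (String × List (String × Int))) (out : List String × List String × List (List Int) × (List (String × List Int))) : Prop := out = convert2List_old_alt label feature test
instance (label : List (String × List (String × Int))) (feature : List String) (test : List (String × List (String × Int))) (out : List String × List String × List (List Int) × (List (String × List Int))) : Decidable (Spec_convert2List_old label feature test out) := by unfold Spec_convert2List_old; infer_instance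

-- ===== CLAIM (what is proved, stated in full; the proofs are below) =====
def Claim_equal_convert2List_old : Prop := ∀ (label : List (String × List (String × Int))) (feature : List String) (test : List (String × List (String × Int))), Dom_convert2List_old label feature test → Pre_convert2List_old label feature test → Spec_convert2List_old label feature test (convert2List_old label feature test)

-- ===== LEMMAS AND PROOFS =====

-- proof-side abbreviations
def pvFive : List String := ["detection", "miss-detection", "type", "miss-type", "miss-type-strict"]

def pvR0 : PySem.Dict String (List Int) :=
  PySem.Dict.ofList [("detection", []), ("miss-detection", []), ("type", []), ("miss-type", []), ("miss-type-strict", [])]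

def pvDv (test : List (String × List (String × Int))) (i : String) : Int :=
  (((test.lookup "detection").getD []).lookup i).getD 0

def pvTv (test : List (String × List (String × Int))) (i : String) : Int :=
  (((test.lookup "type").getD []).lookup i).getD 0

def pvVal (q : String × List (String × Int)) (i : String) : Int := (q.2.lookup i).getD 0

def pvNdt (q : String × List (String × Int)) : Bool := decide (q.1 ∉ (["detection", "type"] : List String))

def pvRow (feature : List String) (p : String × List (String × Int)) : List Int :=
  feature.map (fun j => (p.2.lookup j).getD 0)

-- the per-row contribution of A's loop body to result column k
def pvContrib (test : List (String × List (String × Int))) (i : String) (k : String) : List Int :=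
  (if "detection" ∈ test.map Prod.fst then
     (if k = "detection" then [pvDv test i] else []) ++
     (if k = "miss-detection" then [if pvDv test i = 1 then 0 else 1] else [])
   else []) ++
  (if "type" ∈ test.map Prod.fst then
     (if k = "type" then [pvTv test i] else []) ++
     (if k = "miss-type" then [if pvTv test i = 1 then 0 else 1] else []) ++
     (if k = "miss-type-strict" then [if pvTv test i = 1 then 0 else if pvDv test i = 0 then 0 else 1] else [])
   else []) ++
  (((test.filter pvNdt).filter (fun q => q.1 == k)).map (fun q => pvVal q i))

def pvDetB (test : List (String × List (String × Int))) (i : String) (r : PySem.Dict String (List Int)) :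
    PySem.Dict String (List Int) :=
  if "detection" ∈ test.map Prod.fst then
    let dv := (((test.lookup "detection").getD []).lookup i).getD 0
    let r := r.modify "detection" [] (· ++ [dv])
    if dv = 1 then r.modify "miss-detection" [] (· ++ [0])
    else r.modify "miss-detection" [] (· ++ [1])
  else r

def pvTypeB (test : List (String × List (String × Int))) (i : String) (r : PySem.Dict String (List Int)) :
    PySem.Dict String (List Int) :=
  if "type" ∈ test.map Prod.fst then
    let tv := (((test.lookup "type").getD []).lookup i).getD 0
    let r := r.modify "type" [] (· ++ [tv])
    if tv = 1 then
      (r.modify "miss-type" [] (· ++ [0])).modify "miss-type-strict" [] (· ++ [0])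
    else
      let r := r.modify "miss-type" [] (· ++ [1])
      let dv := (((test.lookup "detection").getD []).lookup i).getD 0
      if dv = 0 then r.modify "miss-type-strict" [] (· ++ [0])
      else r.modify "miss-type-strict" [] (· ++ [1])
  else r

def pvExA (ts : List (String × List (String × Int))) (i : String) (r : PySem.Dict String (List Int)) :
    PySem.Dict String (List Int) :=
  ts.foldl (fun r q =>
    if q.1 ∉ (["detection", "type"] : List String) then
      let r := if q.1 ∉ r.keys then r.insert q.1 [] else r
      r.modify q.1 [] (· ++ [(q.2.lookup i).getD 0])
    else r) r

def pvDstep (test : List (String × List (String × Int))) (r : PySem.Dict String (List Int))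
    (p : String × List (String × Int)) : PySem.Dict String (List Int) :=
  pvExA test p.1 (pvTypeB test p.1 (pvDetB test p.1 r))

theorem pvStep_eq (feature : List String) (test : List (String × List (String × Int)))
    (st : List String × List (List Int) × PySem.Dict String (List Int)) (p : String × List (String × Int)) :
    convA_step feature test st p = (st.1 ++ [p.1], st.2.1 ++ [pvRow feature p], pvDstep test st.2.2 p) := by
  simp only [convA_step, pvDstep, pvExA, pvTypeB, pvDetB, pvRow,
    PySem.List.foldl_append_singleton_eq_map, List.nil_append]

theorem pvFoldA (feature : List String) (test : List (String × List (String × Int))) :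
    ∀ (label : List (String × List (String × Int))) (a : List String) (b : List (List Int))
      (r : PySem.Dict String (List Int)),
      label.foldl (convA_step feature test) (a, b, r) =
        (a ++ label.map Prod.fst, b ++ label.map (pvRow feature), label.foldl (pvDstep test) r) := by
  intro label
  induction label with
  | nil => intro a b r; simp
  | cons p l ih =>
    intro a b r
    simp only [List.foldl_cons, pvStep_eq, ih, List.append_assoc, List.singleton_append, List.map_cons]

theorem pvGetD_appendMod (r : PySem.Dict String (List Int)) (a k : String) (v : Int) :
    (r.modify a [] (· ++ [v])).getD k [] = r.getD k [] ++ (if k = a then [v] else []) := by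
  rw [PySem.Dict.getD_modify]
  split_ifs with h
  · subst h; rfl
  · simp

theorem pvKeys_mod_of_mem (r : PySem.Dict String (List Int)) (a : String) (f : List Int → List Int)
    (h : a ∈ r.keys) : (r.modify a [] f).keys = r.keys := by
  rw [PySem.Dict.keys_modify, PySem.Dict.keys_insert_of_contains]
  exact (PySem.Dict.contains_iff_mem_keys r a).2 h

theorem pvGetD_condInsert (r : PySem.Dict String (List Int)) (a k : String) :
    (if a ∉ r.keys then r.insert a [] else r).getD k [] = r.getD k [] := by
  by_cases h : a ∈ r.keys
  · simp [h]
  · have hc : r.contains a = false := by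
      rcases Bool.eq_false_or_eq_true (r.contains a) with hc | hc
      · exact absurd ((PySem.Dict.contains_iff_mem_keys r a).1 hc) h
      · exact hc
    simp only [h, not_false_eq_true, if_pos]
    rcases eq_or_ne k a with rfl | hne
    · rw [PySem.Dict.getD_insert_self, PySem.Dict.getD_of_not_contains _ _ hc]
    · exact PySem.Dict.getD_insert_of_ne _ _ _ hne

theorem pvNotContains (r : PySem.Dict String (List Int)) (a : String) (h : a ∉ r.keys) :
    r.contains a = false := by
  rcases Bool.eq_false_or_eq_true (r.contains a) with hc | hc
  · exact absurd ((PySem.Dict.contains_iff_mem_keys r a).1 hc) h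
  · exact hc

theorem pvExA_getD (i k : String) :
    ∀ (ts : List (String × List (String × Int))) (r : PySem.Dict String (List Int)),
      (pvExA ts i r).getD k [] =
        r.getD k [] ++ ((ts.filter pvNdt).filter (fun q => q.1 == k)).map (fun q => pvVal q i) := by
  intro ts
  induction ts with
  | nil => intro r; simp [pvExA]
  | cons q ts ih =>
    intro r
    by_cases hq : q.1 ∉ (["detection", "type"] : List String)
    · obtain ⟨h1, h2⟩ : ¬q.1 = "detection" ∧ ¬q.1 = "type" := by simpa [not_or] using hq
      have hstep : pvExA (q :: ts) i r =
          pvExA ts i ((if q.1 ∉ r.keys then r.insert q.1 [] else r).modify q.1 [] (· ++ [(q.2.lookup i).getD 0])) := by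
        simp only [pvExA, List.foldl_cons]
        congr 1
        simp [h1, h2]
      rw [hstep, ih]
      rw [pvGetD_appendMod, pvGetD_condInsert]
      have hnd : pvNdt q = true := by simp [pvNdt, hq]
      rcases eq_or_ne k q.1 with rfl | hne
      · simp [List.filter_cons, hnd, pvVal, List.append_assoc]
      · simp [List.filter_cons, hnd, Ne.symm hne, hne, List.append_assoc]
    · have hd : q.1 = "detection" ∨ q.1 = "type" := by simpa using not_not.1 hq
      have hstep : pvExA (q :: ts) i r = pvExA ts i r := by
        simp only [pvExA, List.foldl_cons]
        congr 1
        rcases hd with h | h <;> simp [h]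
      have hnd : pvNdt q = false := by
        rcases hd with h | h <;> simp [pvNdt, h]
      rw [hstep, ih]
      simp [List.filter_cons, hnd]

theorem pvExA_keys (i : String) :
    ∀ (ts : List (String × List (String × Int))) (r : PySem.Dict String (List Int)),
      (pvExA ts i r).keys = PySem.Set.update r.keys ((ts.filter pvNdt).map Prod.fst) := by
  intro ts
  induction ts with
  | nil => intro r; simp [pvExA, PySem.Set.update_nil]
  | cons q ts ih =>
    intro r
    by_cases hq : q.1 ∉ (["detection", "type"] : List String)
    · obtain ⟨h1, h2⟩ : ¬q.1 = "detection" ∧ ¬q.1 = "type" := by simpa [not_or] using hq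
      have hstep : pvExA (q :: ts) i r =
          pvExA ts i ((if q.1 ∉ r.keys then r.insert q.1 [] else r).modify q.1 [] (· ++ [(q.2.lookup i).getD 0])) := by
        simp only [pvExA, List.foldl_cons]
        congr 1
        simp [h1, h2]
      have hnd : pvNdt q = true := by simp [pvNdt, hq]
      have hkeys : ((if q.1 ∉ r.keys then r.insert q.1 [] else r).modify q.1 [] (· ++ [(q.2.lookup i).getD 0])).keys
          = PySem.Set.add r.keys q.1 := by
        by_cases hm : q.1 ∈ r.keys
        · rw [if_neg (by simpa using hm), pvKeys_mod_of_mem _ _ _ hm, PySem.Set.add_of_mem hm]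
        · have hc : r.contains q.1 = false := pvNotContains r q.1 hm
          rw [if_pos hm, pvKeys_mod_of_mem _ _ _ ((PySem.Dict.mem_keys_insert _ _ _ _).2 (Or.inl rfl)),
            PySem.Dict.keys_insert_of_not_contains _ _ hc, PySem.Set.add_of_not_mem hm]
      rw [hstep, ih, hkeys]
      have hf : (List.filter pvNdt (q :: ts)).map Prod.fst = q.1 :: (ts.filter pvNdt).map Prod.fst := by
        simp [List.filter_cons, hnd]
      rw [hf, PySem.Set.update_cons]
    · have hd : q.1 = "detection" ∨ q.1 = "type" := by simpa using not_not.1 hq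
      have hstep : pvExA (q :: ts) i r = pvExA ts i r := by
        simp only [pvExA, List.foldl_cons]
        congr 1
        rcases hd with h | h <;> simp [h]
      have hnd : pvNdt q = false := by
        rcases hd with h | h <;> simp [pvNdt, h]
      rw [hstep, ih]
      simp [List.filter_cons, hnd]

theorem pvDetB_getD (test : List (String × List (String × Int))) (i k : String)
    (r : PySem.Dict String (List Int)) :
    (pvDetB test i r).getD k [] = r.getD k [] ++
      (if "detection" ∈ test.map Prod.fst then
        (if k = "detection" then [pvDv test i] else []) ++
        (if k = "miss-detection" then [if pvDv test i = 1 then 0 else 1] else [])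
       else []) := by
  by_cases hD : "detection" ∈ test.map Prod.fst
  · by_cases hdv : (((test.lookup "detection").getD []).lookup i).getD 0 = 1
    · simp [pvDetB, hD, hdv, pvGetD_appendMod, pvDv, List.append_assoc]
    · simp [pvDetB, hD, hdv, pvGetD_appendMod, pvDv, List.append_assoc]
  · simp [pvDetB, hD]

theorem pvTypeB_getD (test : List (String × List (String × Int))) (i k : String)
    (r : PySem.Dict String (List Int)) :
    (pvTypeB test i r).getD k [] = r.getD k [] ++
      (if "type" ∈ test.map Prod.fst then
        (if k = "type" then [pvTv test i] else []) ++
        (if k = "miss-type" then [if pvTv test i = 1 then 0 else 1] else []) ++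
        (if k = "miss-type-strict" then [if pvTv test i = 1 then 0 else if pvDv test i = 0 then 0 else 1] else [])
       else []) := by
  by_cases hT : "type" ∈ test.map Prod.fst
  · by_cases htv : (((test.lookup "type").getD []).lookup i).getD 0 = 1
    · simp [pvTypeB, hT, htv, pvGetD_appendMod, pvTv, pvDv, List.append_assoc]
    · by_cases hdv : (((test.lookup "detection").getD []).lookup i).getD 0 = 0
      · simp [pvTypeB, hT, htv, hdv, pvGetD_appendMod, pvTv, pvDv, List.append_assoc]
      · simp [pvTypeB, hT, htv, hdv, pvGetD_appendMod, pvTv, pvDv, List.append_assoc]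
  · simp [pvTypeB, hT]

theorem pvDstep_getD (test : List (String × List (String × Int))) (r : PySem.Dict String (List Int))
    (p : String × List (String × Int)) (k : String) :
    (pvDstep test r p).getD k [] = r.getD k [] ++ pvContrib test p.1 k := by
  simp only [pvDstep, pvContrib, pvExA_getD, pvTypeB_getD, pvDetB_getD, List.append_assoc]

theorem pvDetB_keys (test : List (String × List (String × Int))) (i : String)
    (r : PySem.Dict String (List Int)) (h1 : "detection" ∈ r.keys) (h2 : "miss-detection" ∈ r.keys) :
    (pvDetB test i r).keys = r.keys := by
  by_cases hD : "detection" ∈ test.map Prod.fst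
  · simp only [pvDetB, if_pos hD]
    have e1 : (r.modify "detection" [] (· ++ [(((test.lookup "detection").getD []).lookup i).getD 0])).keys = r.keys :=
      pvKeys_mod_of_mem _ _ _ h1
    by_cases hdv : (((test.lookup "detection").getD []).lookup i).getD 0 = 1
    · rw [if_pos hdv, pvKeys_mod_of_mem _ _ _ (by rw [e1]; exact h2), e1]
    · rw [if_neg hdv, pvKeys_mod_of_mem _ _ _ (by rw [e1]; exact h2), e1]
  · simp [pvDetB, hD]

theorem pvTypeB_keys (test : List (String × List (String × Int))) (i : String)
    (r : PySem.Dict String (List Int)) (h1 : "type" ∈ r.keys) (h2 : "miss-type" ∈ r.keys)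
    (h3 : "miss-type-strict" ∈ r.keys) :
    (pvTypeB test i r).keys = r.keys := by
  by_cases hT : "type" ∈ test.map Prod.fst
  · simp only [pvTypeB, if_pos hT]
    have e1 : (r.modify "type" [] (· ++ [(((test.lookup "type").getD []).lookup i).getD 0])).keys = r.keys :=
      pvKeys_mod_of_mem _ _ _ h1
    by_cases htv : (((test.lookup "type").getD []).lookup i).getD 0 = 1
    · rw [if_pos htv]
      have e2 := pvKeys_mod_of_mem ((r.modify "type" [] (· ++ [(((test.lookup "type").getD []).lookup i).getD 0]))) "miss-type" (· ++ [0]) (by rw [e1]; exact h2)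
      rw [pvKeys_mod_of_mem _ _ _ (by rw [e2, e1]; exact h3), e2, e1]
    · rw [if_neg htv]
      have e2 := pvKeys_mod_of_mem ((r.modify "type" [] (· ++ [(((test.lookup "type").getD []).lookup i).getD 0]))) "miss-type" (· ++ [1]) (by rw [e1]; exact h2)
      by_cases hdv : (((test.lookup "detection").getD []).lookup i).getD 0 = 0
      · rw [if_pos hdv, pvKeys_mod_of_mem _ _ _ (by rw [e2, e1]; exact h3), e2, e1]
      · rw [if_neg hdv, pvKeys_mod_of_mem _ _ _ (by rw [e2, e1]; exact h3), e2, e1]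
  · simp [pvTypeB, hT]

theorem pvDstep_keys (test : List (String × List (String × Int))) (r : PySem.Dict String (List Int))
    (p : String × List (String × Int)) (h5 : ∀ x ∈ pvFive, x ∈ r.keys) :
    (pvDstep test r p).keys = PySem.Set.update r.keys ((test.filter pvNdt).map Prod.fst) := by
  have hdk : (pvDetB test p.1 r).keys = r.keys :=
    pvDetB_keys _ _ _ (h5 _ (by simp [pvFive])) (h5 _ (by simp [pvFive]))
  have htk : (pvTypeB test p.1 (pvDetB test p.1 r)).keys = r.keys := by
    rw [pvTypeB_keys _ _ _ (by rw [hdk]; exact h5 _ (by simp [pvFive]))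
      (by rw [hdk]; exact h5 _ (by simp [pvFive])) (by rw [hdk]; exact h5 _ (by simp [pvFive])), hdk]
  rw [pvDstep, pvExA_keys, htk]

theorem pvFoldD_getD (test : List (String × List (String × Int))) (k : String) :
    ∀ (label : List (String × List (String × Int))) (r : PySem.Dict String (List Int)),
      (label.foldl (pvDstep test) r).getD k [] =
        r.getD k [] ++ (label.map (fun p => pvContrib test p.1 k)).flatten := by
  intro label
  induction label with
  | nil => intro r; simp
  | cons p l ih =>
    intro r
    simp only [List.foldl_cons]
    rw [ih, pvDstep_getD]
    simp [List.append_assoc]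

theorem pvR0_keys : pvR0.keys = pvFive := by decide

theorem pvFive_nodup : pvFive.Nodup := by decide

-- ===== B-side lemmas (record + pivot) =====

-- the record's base part (derived columns) as a literal pair list
def pvBase (test : List (String × List (String × Int))) (i : String) : List (String × Int) :=
  (if "detection" ∈ test.map Prod.fst then
     [("detection", pvDv test i), ("miss-detection", if pvDv test i = 1 then 0 else 1)]
   else []) ++
  (if "type" ∈ test.map Prod.fst then
     [("type", pvTv test i), ("miss-type", if pvTv test i = 1 then 0 else 1),
      ("miss-type-strict", if pvTv test i = 1 then 0 else if pvDv test i = 0 then 0 else 1)]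
   else [])

theorem pvRecB_eq (i : String) (test : List (String × List (String × Int))) :
    recB i test = test.foldl (fun rec q =>
      if q.1 ∉ (["detection", "type"] : List String) then rec.insert q.1 ((q.2.lookup i).getD 0)
      else rec) (PySem.Dict.mk (pvBase test i)) := by
  rw [recB]
  by_cases hD : "detection" ∈ test.map Prod.fst <;>
    by_cases hT : "type" ∈ test.map Prod.fst <;>
      simp only [hD, hT, if_true, if_false, pvBase, pvDv, pvTv, List.append_nil, List.nil_append,
        if_pos, if_neg, not_false_eq_true, List.cons_append] <;> rfl

theorem pvFilter_eq_pvNdt (test : List (String × List (String × Int))) :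
    (test.filter (fun q => decide (q.1 ∉ (["detection", "type"] : List String)))) = test.filter pvNdt := rfl

theorem pvBaseKeys_sub_five (test : List (String × List (String × Int))) (i : String) :
    ∀ x ∈ (pvBase test i).map Prod.fst, x ∈ pvFive := by
  intro x hx
  have hx' : x = "detection" ∨ x = "miss-detection" ∨ x = "type" ∨ x = "miss-type" ∨ x = "miss-type-strict" := by
    simp only [pvBase, List.map_append, List.mem_append] at hx
    rcases hx with hx | hx
    · by_cases hD : "detection" ∈ test.map Prod.fst
      · rw [if_pos hD] at hx
        have : x = "detection" ∨ x = "miss-detection" := by simpa using hx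
        tauto
      · rw [if_neg hD] at hx; simp at hx
    · by_cases hT : "type" ∈ test.map Prod.fst
      · rw [if_pos hT] at hx
        have : x = "type" ∨ x = "miss-type" ∨ x = "miss-type-strict" := by simpa using hx
        tauto
      · rw [if_neg hT] at hx; simp at hx
  simp only [pvFive, List.mem_cons, List.not_mem_nil, or_false]
  tauto

theorem pvFreshBase (test : List (String × List (String × Int))) (i : String)
    (hc1 : ¬("detection" ∈ test.map Prod.fst ∧ "miss-detection" ∈ test.map Prod.fst))
    (hc2 : ¬("type" ∈ test.map Prod.fst ∧ ("miss-type" ∈ test.map Prod.fst ∨ "miss-type-strict" ∈ test.map Prod.fst))) :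
    ∀ q ∈ test.filter pvNdt, (PySem.Dict.mk (pvBase test i)).contains q.1 = false := by
  intro q hq
  have hqt : q ∈ test := List.mem_of_mem_filter hq
  have hnd : pvNdt q = true := List.of_mem_filter hq
  obtain ⟨h1, h2⟩ : ¬q.1 = "detection" ∧ ¬q.1 = "type" := by
    simpa [pvNdt, not_or] using hnd
  have hmem : q.1 ∈ test.map Prod.fst := List.mem_map_of_mem hqt
  rw [PySem.Dict.contains_mk, List.any_eq_false]
  intro p hp
  simp only [beq_iff_eq]
  intro hpq
  have hp1 : q.1 ∈ (pvBase test i).map Prod.fst := hpq ▸ List.mem_map_of_mem hp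
  simp only [pvBase, List.map_append, List.mem_append] at hp1
  rcases hp1 with hx | hx
  · by_cases hD : "detection" ∈ test.map Prod.fst
    · rw [if_pos hD] at hx
      have hx' : q.1 = "detection" ∨ q.1 = "miss-detection" := by simpa using hx
      rcases hx' with h | h
      · exact h1 h
      · exact hc1 ⟨hD, h ▸ hmem⟩
    · rw [if_neg hD] at hx; simp at hx
  · by_cases hT : "type" ∈ test.map Prod.fst
    · rw [if_pos hT] at hx
      have hx' : q.1 = "type" ∨ q.1 = "miss-type" ∨ q.1 = "miss-type-strict" := by simpa using hx
      rcases hx' with h | h | h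
      · exact h2 h
      · exact hc2 ⟨hT, Or.inl (h ▸ hmem)⟩
      · exact hc2 ⟨hT, Or.inr (h ▸ hmem)⟩
    · rw [if_neg hT] at hx; simp at hx

theorem pvFilterFst_nodup (test : List (String × List (String × Int)))
    (hndT : (test.map Prod.fst).Nodup) : ((test.filter pvNdt).map Prod.fst).Nodup :=
  List.Nodup.sublist (List.Sublist.map Prod.fst List.filter_sublist) hndT

theorem pvRecB_items (test : List (String × List (String × Int))) (i : String)
    (hndT : (test.map Prod.fst).Nodup)
    (hc1 : ¬("detection" ∈ test.map Prod.fst ∧ "miss-detection" ∈ test.map Prod.fst))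
    (hc2 : ¬("type" ∈ test.map Prod.fst ∧ ("miss-type" ∈ test.map Prod.fst ∨ "miss-type-strict" ∈ test.map Prod.fst))) :
    (recB i test).items = pvBase test i ++ (test.filter pvNdt).map (fun q => (q.1, pvVal q i)) := by
  rw [pvRecB_eq, PySem.List.foldl_ite_eq_foldl_filter, pvFilter_eq_pvNdt]
  exact PySem.Dict.items_foldl_insert_fresh (test.filter pvNdt) Prod.fst (fun q => pvVal q i)
    (PySem.Dict.mk (pvBase test i)) (pvFreshBase test i hc1 hc2) (pvFilterFst_nodup test hndT)

theorem pvRecB_keys (test : List (String × List (String × Int))) (i : String)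
    (hndT : (test.map Prod.fst).Nodup)
    (hc1 : ¬("detection" ∈ test.map Prod.fst ∧ "miss-detection" ∈ test.map Prod.fst))
    (hc2 : ¬("type" ∈ test.map Prod.fst ∧ ("miss-type" ∈ test.map Prod.fst ∨ "miss-type-strict" ∈ test.map Prod.fst))) :
    (recB i test).keys = (pvBase test i).map Prod.fst ++ ((test.filter pvNdt).map Prod.fst) := by
  simp only [PySem.Dict.keys, pvRecB_items test i hndT hc1 hc2, List.map_append, List.map_map]
  rfl

-- fold of the pivot's inner loop over an arbitrary pair list, pointwise getD
theorem pvPiv_getD (k : String) :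
    ∀ (L : List (String × Int)) (r : PySem.Dict String (List Int)),
      (L.foldl (fun r kv => (r.setdefault kv.1 []).modify kv.1 [] (· ++ [kv.2])) r).getD k [] =
        r.getD k [] ++ (L.filter (fun kv => kv.1 == k)).map (fun kv => kv.2) := by
  intro L
  induction L with
  | nil => intro r; simp
  | cons kv L ih =>
    intro r
    simp only [List.foldl_cons]
    rw [ih, pvGetD_appendMod]
    have hsd : ((r.setdefault kv.1 []).getD k []) = r.getD k [] := by
      rcases eq_or_ne k kv.1 with rfl | hne
      · rw [PySem.Dict.getD_setdefault_self]
      · rw [PySem.Dict.getD_eq_get?_getD, PySem.Dict.get?_setdefault_of_ne _ _ hne,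
          ← PySem.Dict.getD_eq_get?_getD]
    rw [hsd]
    rcases eq_or_ne k kv.1 with rfl | hne
    · simp [List.filter_cons, List.append_assoc]
    · simp [List.filter_cons, Ne.symm hne, hne, List.append_assoc]

theorem pvPiv_keys :
    ∀ (L : List (String × Int)) (r : PySem.Dict String (List Int)),
      (L.foldl (fun r kv => (r.setdefault kv.1 []).modify kv.1 [] (· ++ [kv.2])) r).keys =
        PySem.Set.update r.keys (L.map Prod.fst) := by
  intro L
  induction L with
  | nil => intro r; simp [PySem.Set.update_nil]
  | cons kv L ih =>
    intro r
    simp only [List.foldl_cons]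
    rw [ih]
    have hmemsd : kv.1 ∈ (r.setdefault kv.1 []).keys := by
      rw [PySem.Dict.keys_setdefault]
      split_ifs with hc
      · exact (PySem.Dict.contains_iff_mem_keys r kv.1).1 hc
      · simp
    have hk : ((r.setdefault kv.1 []).modify kv.1 [] (· ++ [kv.2])).keys = PySem.Set.add r.keys kv.1 := by
      rw [pvKeys_mod_of_mem _ _ _ hmemsd, PySem.Dict.keys_setdefault]
      by_cases hm : kv.1 ∈ r.keys
      · rw [if_pos ((PySem.Dict.contains_iff_mem_keys r kv.1).2 hm), PySem.Set.add_of_mem hm]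
      · rw [if_neg (by rw [pvNotContains r kv.1 hm]; simp), PySem.Set.add_of_not_mem hm]
    rw [hk, List.map_cons, PySem.Set.update_cons]

-- the record's filtered values reproduce A's per-row contribution
theorem pvContrib_eq_rec (test : List (String × List (String × Int))) (i k : String)
    (hndT : (test.map Prod.fst).Nodup)
    (hc1 : ¬("detection" ∈ test.map Prod.fst ∧ "miss-detection" ∈ test.map Prod.fst))
    (hc2 : ¬("type" ∈ test.map Prod.fst ∧ ("miss-type" ∈ test.map Prod.fst ∨ "miss-type-strict" ∈ test.map Prod.fst))) :
    ((recB i test).items.filter (fun kv => kv.1 == k)).map (fun kv => kv.2) = pvContrib test i k := by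
  rw [pvRecB_items test i hndT hc1 hc2, List.filter_append, List.map_append]
  have hextras : (((test.filter pvNdt).map (fun q => (q.1, pvVal q i))).filter (fun kv => kv.1 == k)).map (fun kv => kv.2)
      = ((test.filter pvNdt).filter (fun q => q.1 == k)).map (fun q => pvVal q i) := by
    rw [List.filter_map]
    simp [Function.comp_def]
  have hbase : ((pvBase test i).filter (fun kv => kv.1 == k)).map (fun kv => kv.2) =
      (if "detection" ∈ test.map Prod.fst then
        (if k = "detection" then [pvDv test i] else []) ++
        (if k = "miss-detection" then [if pvDv test i = 1 then 0 else 1] else [])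
       else []) ++
      (if "type" ∈ test.map Prod.fst then
        (if k = "type" then [pvTv test i] else []) ++
        (if k = "miss-type" then [if pvTv test i = 1 then 0 else 1] else []) ++
        (if k = "miss-type-strict" then [if pvTv test i = 1 then 0 else if pvDv test i = 0 then 0 else 1] else [])
       else []) := by
    by_cases k1 : k = "detection"
    · subst k1
      by_cases hD : "detection" ∈ test.map Prod.fst <;> by_cases hT : "type" ∈ test.map Prod.fst <;>
        simp [pvBase, hD, hT, List.filter_cons]
    · by_cases k2 : k = "miss-detection"
      · subst k2
        by_cases hD : "detection" ∈ test.map Prod.fst <;> by_cases hT : "type" ∈ test.map Prod.fst <;>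
          simp [pvBase, hD, hT, List.filter_cons]
      · by_cases k3 : k = "type"
        · subst k3
          by_cases hD : "detection" ∈ test.map Prod.fst <;> by_cases hT : "type" ∈ test.map Prod.fst <;>
            simp [pvBase, hD, hT, List.filter_cons]
        · by_cases k4 : k = "miss-type"
          · subst k4
            by_cases hD : "detection" ∈ test.map Prod.fst <;> by_cases hT : "type" ∈ test.map Prod.fst <;>
              simp [pvBase, hD, hT, List.filter_cons]
          · by_cases k5 : k = "miss-type-strict"
            · subst k5
              by_cases hD : "detection" ∈ test.map Prod.fst <;> by_cases hT : "type" ∈ test.map Prod.fst <;>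
                simp [pvBase, hD, hT, List.filter_cons]
            · by_cases hD : "detection" ∈ test.map Prod.fst <;> by_cases hT : "type" ∈ test.map Prod.fst <;>
                simp [pvBase, hD, hT, List.filter_cons, k1, k2, k3, k4, k5,
                  Ne.symm (k1 : ¬k = "detection"), Ne.symm k2, Ne.symm k3, Ne.symm k4, Ne.symm k5]
  rw [hbase, hextras, pvContrib, List.append_assoc]

-- the pivot step, named for the proofs (definitionally the inner loop of B's pivot)
def pvPivStep (r : PySem.Dict String (List Int)) (rec : PySem.Dict String Int) :
    PySem.Dict String (List Int) :=
  rec.items.foldl (fun r kv => (r.setdefault kv.1 []).modify kv.1 [] (· ++ [kv.2])) r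

theorem pvUpdate_of_mem (s : PySem.Set String) (xs : List String) (h : ∀ x ∈ xs, x ∈ s) :
    PySem.Set.update s xs = s := by
  rw [PySem.Set.update_eq_append_filter]
  have hnil : List.filter (fun y => !s.contains y) (PySem.Set.ofList xs) = [] := by
    rw [List.filter_eq_nil_iff]
    intro a ha
    have : a ∈ xs := (PySem.Set.mem_ofList _ _).1 ha
    simp [h a this]
  rw [hnil, List.append_nil]

theorem pvPivStep_keys (test : List (String × List (String × Int))) (i : String)
    (r : PySem.Dict String (List Int))
    (hndT : (test.map Prod.fst).Nodup)
    (hc1 : ¬("detection" ∈ test.map Prod.fst ∧ "miss-detection" ∈ test.map Prod.fst))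
    (hc2 : ¬("type" ∈ test.map Prod.fst ∧ ("miss-type" ∈ test.map Prod.fst ∨ "miss-type-strict" ∈ test.map Prod.fst)))
    (h5 : ∀ x ∈ pvFive, x ∈ r.keys) :
    (pvPivStep r (recB i test)).keys = PySem.Set.update r.keys ((test.filter pvNdt).map Prod.fst) := by
  rw [pvPivStep, pvPiv_keys]
  have hik : (recB i test).items.map Prod.fst = (recB i test).keys := rfl
  rw [hik, pvRecB_keys test i hndT hc1 hc2, PySem.Set.update_append,
    pvUpdate_of_mem _ _ (fun x hx => h5 x (pvBaseKeys_sub_five test i x hx))]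

theorem pvUpdate_idem (s : PySem.Set String) (xs : List String) :
    (s.update xs).update xs = s.update xs :=
  pvUpdate_of_mem _ _ (fun x hx => (PySem.Set.mem_update _ _ _).2 (Or.inr hx))

theorem pvFoldD_keys (test : List (String × List (String × Int))) :
    ∀ (label : List (String × List (String × Int))) (r : PySem.Dict String (List Int)),
      (∀ x ∈ pvFive, x ∈ r.keys) →
      (label.foldl (pvDstep test) r).keys =
        if label.isEmpty then r.keys else PySem.Set.update r.keys ((test.filter pvNdt).map Prod.fst) := by
  intro label
  induction label with
  | nil => intro r _; simp
  | cons p l ih =>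
    intro r h5
    have hstep := pvDstep_keys test r p h5
    have h5' : ∀ x ∈ pvFive, x ∈ (pvDstep test r p).keys := by
      intro x hx
      rw [hstep]
      exact (PySem.Set.mem_update _ _ _).2 (Or.inl (h5 x hx))
    simp only [List.foldl_cons]
    rw [ih _ h5', hstep]
    cases l with
    | nil => simp
    | cons q l => simp [pvUpdate_idem]

theorem pvFoldB_keys (test : List (String × List (String × Int)))
    (hndT : (test.map Prod.fst).Nodup)
    (hc1 : ¬("detection" ∈ test.map Prod.fst ∧ "miss-detection" ∈ test.map Prod.fst))
    (hc2 : ¬("type" ∈ test.map Prod.fst ∧ ("miss-type" ∈ test.map Prod.fst ∨ "miss-type-strict" ∈ test.map Prod.fst))) :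
    ∀ (label : List (String × List (String × Int))) (r : PySem.Dict String (List Int)),
      (∀ x ∈ pvFive, x ∈ r.keys) →
      ((label.map (fun p => recB p.1 test)).foldl pvPivStep r).keys =
        if label.isEmpty then r.keys else PySem.Set.update r.keys ((test.filter pvNdt).map Prod.fst) := by
  intro label
  induction label with
  | nil => intro r _; simp
  | cons p l ih =>
    intro r h5
    have hstep := pvPivStep_keys test p.1 r hndT hc1 hc2 h5
    have h5' : ∀ x ∈ pvFive, x ∈ (pvPivStep r (recB p.1 test)).keys := by
      intro x hx
      rw [hstep]
      exact (PySem.Set.mem_update _ _ _).2 (Or.inl (h5 x hx))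
    simp only [List.map_cons, List.foldl_cons]
    rw [ih _ h5', hstep]
    cases l with
    | nil => simp
    | cons q l => simp [pvUpdate_idem]

theorem pvFoldB_getD (test : List (String × List (String × Int))) (k : String)
    (hndT : (test.map Prod.fst).Nodup)
    (hc1 : ¬("detection" ∈ test.map Prod.fst ∧ "miss-detection" ∈ test.map Prod.fst))
    (hc2 : ¬("type" ∈ test.map Prod.fst ∧ ("miss-type" ∈ test.map Prod.fst ∨ "miss-type-strict" ∈ test.map Prod.fst))) :
    ∀ (label : List (String × List (String × Int))) (r : PySem.Dict String (List Int)),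
      ((label.map (fun p => recB p.1 test)).foldl pvPivStep r).getD k [] =
        r.getD k [] ++ (label.map (fun p => pvContrib test p.1 k)).flatten := by
  intro label
  induction label with
  | nil => intro r; simp
  | cons p l ih =>
    intro r
    simp only [List.map_cons, List.foldl_cons]
    rw [ih]
    have hstep : (pvPivStep r (recB p.1 test)).getD k [] = r.getD k [] ++ pvContrib test p.1 k := by
      rw [pvPivStep, pvPiv_getD, pvContrib_eq_rec test p.1 k hndT hc1 hc2]
    rw [hstep]
    simp [List.append_assoc]

theorem pvItems_eq (label test : List (String × List (String × Int)))
    (hndT : (test.map Prod.fst).Nodup)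
    (hcoll : label ≠ [] →
      ¬("detection" ∈ test.map Prod.fst ∧ "miss-detection" ∈ test.map Prod.fst) ∧
      ¬("type" ∈ test.map Prod.fst ∧ ("miss-type" ∈ test.map Prod.fst ∨ "miss-type-strict" ∈ test.map Prod.fst))) :
    (label.foldl (pvDstep test) pvR0).items =
      ((label.map (fun p => recB p.1 test)).foldl pvPivStep pvR0).items := by
  rcases eq_or_ne label [] with rfl | hL
  · rfl
  · obtain ⟨hc1, hc2⟩ := hcoll hL
    have h50 : ∀ x ∈ pvFive, x ∈ pvR0.keys := by rw [pvR0_keys]; exact fun x hx => hx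
    have hkA := pvFoldD_keys test label pvR0 h50
    have hkB := pvFoldB_keys test hndT hc1 hc2 label pvR0 h50
    have hnd : (if label.isEmpty then pvR0.keys
        else PySem.Set.update pvR0.keys ((test.filter pvNdt).map Prod.fst)).Nodup := by
      rw [pvR0_keys]
      split_ifs
      · exact pvFive_nodup
      · exact PySem.Set.nodup_update _ _ pvFive_nodup
    rw [PySem.Dict.items_eq_map_keys _ (by rw [hkA]; exact hnd) [],
      PySem.Dict.items_eq_map_keys _ (by rw [hkB]; exact hnd) [],
      hkA, hkB]
    refine List.map_congr_left (fun k _ => ?_)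
    rw [pvFoldD_getD, pvFoldB_getD test k hndT hc1 hc2]

-- ===== VERDICT (by name: the statement is the Claim_ definition above) =====

theorem convert2List_old_spec : Claim_equal_convert2List_old := by
  intro label feature test _hDom hPre
  obtain ⟨hndL, hndT, _hmem, hcoll⟩ := hPre
  unfold Spec_convert2List_old
  have hA : convert2List_old label feature test =
      (label.map Prod.fst, feature, label.map (pvRow feature),
        (label.foldl (pvDstep test) pvR0).items) := by
    simp only [convert2List_old]
    rw [pvFoldA]
    simp [pvR0]
  have hB : convert2List_old_alt label feature test =
      (label.map Prod.fst, feature, label.map (pvRow feature),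
        ((label.map (fun p => recB p.1 test)).foldl pvPivStep pvR0).items) := rfl
  rw [hA, hB]
  simp only [Prod.mk.injEq, true_and]
  exact pvItems_eq label test hndT hcoll
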